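-- pv_equiv track=rewrite | github.com/daniel-reich/ubiquitous-fiesta | Fx7hyoNTZNMGzc3uj_5.py | number_len_sort
-- ===== SOURCE A (Python) =====
-- def number_len_sort(lst):
--   output = []
--   for nums in lst:
--     if len(str(nums)) == 1:
--       output.append(nums)
--   for nums in lst:
--     if len(str(nums)) == 2:
--       output.append(nums)
--   for nums in lst:
--     if len(str(nums)) == 3:
--       output.append(nums)
--   for nums in lst:
--     if len(str(nums)) == 4:
--       output.append(nums)
--   return output
-- ===== SOURCE B (Python) =====
-- def number_len_sort(lst):
--   return sorted((x for x in lst if len(str(x)) <= 4), key=lambda x: len(str(x)))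
-- ===== Notes on version B (the rewrite author's own statement) =====
-- stated objective: simpler
-- what changed: Replaces A's four separate bucketing passes (one per digit length) with a single filter plus one stable sort keyed by len(str(x)); stability makes equal-length elements keep their original order, exactly as A's sequential appends do.
import Mathlib
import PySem

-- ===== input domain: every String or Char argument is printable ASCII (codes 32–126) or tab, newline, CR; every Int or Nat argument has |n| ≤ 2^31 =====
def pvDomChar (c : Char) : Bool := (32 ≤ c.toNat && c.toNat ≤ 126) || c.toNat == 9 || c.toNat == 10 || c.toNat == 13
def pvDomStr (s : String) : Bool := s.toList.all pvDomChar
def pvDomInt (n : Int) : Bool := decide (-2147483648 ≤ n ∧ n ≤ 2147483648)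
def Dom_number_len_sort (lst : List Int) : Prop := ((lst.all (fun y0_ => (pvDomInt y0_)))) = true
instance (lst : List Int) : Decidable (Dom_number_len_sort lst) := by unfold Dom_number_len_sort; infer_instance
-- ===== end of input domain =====

-- B replaces A's four bucketing passes with one filter and one stable sort keyed by len(str(x)).


-- ===== PORT A =====
def number_len_sort (lst : List Int) : List Int :=
  let output : List Int := []
  let output := lst.foldl (fun output nums =>
    if PySem.Str.len (PySem.Int.toStr nums) = 1 then output ++ [nums] else output) output
  let output := lst.foldl (fun output nums =>
    if PySem.Str.len (PySem.Int.toStr nums) = 2 then output ++ [nums] else output) output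
  let output := lst.foldl (fun output nums =>
    if PySem.Str.len (PySem.Int.toStr nums) = 3 then output ++ [nums] else output) output
  let output := lst.foldl (fun output nums =>
    if PySem.Str.len (PySem.Int.toStr nums) = 4 then output ++ [nums] else output) output
  output

-- ===== PORT B =====
-- len(str(x)), the sort key of Source B
def pvKeyLen (x : Int) : Int := PySem.Str.len (PySem.Int.toStr x)

def number_len_sort_alt (lst : List Int) : List Int :=
  PySem.List.sorted (lst.filter (fun x => decide (pvKeyLen x ≤ 4))) pvKeyLen

-- ===== PRECONDITION & SPEC =====
def Spec_number_len_sort (lst : List Int) (out : List Int) : Prop := out = number_len_sort_alt lst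
instance (lst : List Int) (out : List Int) : Decidable (Spec_number_len_sort lst out) := by unfold Spec_number_len_sort; infer_instance

-- ===== CLAIM (what is proved, stated in full; the proofs are below) =====
def Claim_equal_number_len_sort : Prop := ∀ (lst : List Int), Dom_number_len_sort lst → Spec_number_len_sort lst (number_len_sort lst)

-- ===== LEMMAS AND PROOFS =====

-- str(n) is never empty: Nat.toDigitsCore never shrinks its accumulator
lemma le_length_toDigitsCore (b : Nat) :
    ∀ (f n : Nat) (l : List Char), l.length ≤ (Nat.toDigitsCore b f n l).length := by
  intro f
  induction f with
  | zero => intro n l; simp [Nat.toDigitsCore]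
  | succ f ih =>
    intro n l
    simp only [Nat.toDigitsCore]
    split
    · simp
    · exact le_trans (by simp) (ih _ _)

lemma one_le_pvKeyLen (x : Int) : 1 ≤ pvKeyLen x := by
  unfold pvKeyLen PySem.Str.len
  rw [PySem.Int.toList_toStr]
  unfold PySem.Int.toChars
  split
  · simp
  · unfold Nat.toDigits
    have h := le_length_toDigitsCore 10 x.toNat (x.toNat / 10) [Nat.digitChar (x.toNat % 10)]
    simp only [Nat.toDigitsCore]
    split
    · simp
    · exact_mod_cast le_trans (by simp) h

lemma insertBy_all_before {α : Type} (before : α → α → Bool) (x : α) (l : List α)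
    (h : ∀ y ∈ l, before x y = true) :
    PySem.List.insertBy before x l = x :: l := by
  cases l with
  | nil => simp [PySem.List.insertBy]
  | cons y ys => simp [PySem.List.insertBy, h y (by simp)]

lemma insertBy_append_none {α : Type} (before : α → α → Bool) (x : α) (l1 l2 : List α)
    (h : ∀ y ∈ l1, before x y = false) :
    PySem.List.insertBy before x (l1 ++ l2) = l1 ++ PySem.List.insertBy before x l2 := by
  induction l1 with
  | nil => simp
  | cons y ys ih =>
    have hy : before x y = false := h y (by simp)
    simp only [List.cons_append, PySem.List.insertBy, hy]
    simp only [Bool.false_eq_true, if_false, List.cons.injEq, true_and]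
    exact ih (fun z hz => h z (by simp [hz]))

-- inserting x after every element it is not "before" and in front of the rest
lemma insertBy_mid {α : Type} (before : α → α → Bool) (x : α) (l1 l2 : List α)
    (h1 : ∀ y ∈ l1, before x y = false) (h2 : ∀ y ∈ l2, before x y = true) :
    PySem.List.insertBy before x (l1 ++ l2) = l1 ++ x :: l2 := by
  rw [insertBy_append_none _ _ _ _ h1, insertBy_all_before _ _ _ h2]

-- the stable insertion sort of the kept elements fills the four length buckets in order
lemma buckets (xs : List Int) : ∀ (b1 b2 b3 b4 : List Int),
    (∀ y ∈ b1, pvKeyLen y = 1) → (∀ y ∈ b2, pvKeyLen y = 2) →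
    (∀ y ∈ b3, pvKeyLen y = 3) → (∀ y ∈ b4, pvKeyLen y = 4) →
    List.foldl (fun acc x => PySem.List.insertBy (fun a b => decide (pvKeyLen a < pvKeyLen b)) x acc)
      (b1 ++ b2 ++ b3 ++ b4) (xs.filter (fun x => decide (pvKeyLen x ≤ 4)))
    = (b1 ++ xs.filter (fun y => decide (pvKeyLen y = 1)))
      ++ (b2 ++ xs.filter (fun y => decide (pvKeyLen y = 2)))
      ++ (b3 ++ xs.filter (fun y => decide (pvKeyLen y = 3)))
      ++ (b4 ++ xs.filter (fun y => decide (pvKeyLen y = 4))) := by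
  induction xs with
  | nil => intro b1 b2 b3 b4 _ _ _ _; simp
  | cons x xs ih =>
    intro b1 b2 b3 b4 h1 h2 h3 h4
    by_cases hx : pvKeyLen x ≤ 4
    · have hx1 := one_le_pvKeyLen x
      have hcases : pvKeyLen x = 1 ∨ pvKeyLen x = 2 ∨ pvKeyLen x = 3 ∨ pvKeyLen x = 4 := by omega
      rcases hcases with hk | hk | hk | hk
      · -- key 1: x goes to the end of bucket 1
        rw [List.filter_cons_of_pos (p := fun x => decide (pvKeyLen x ≤ 4)) (by simp [hx]),
            List.foldl_cons,
            List.filter_cons_of_pos (p := fun y => decide (pvKeyLen y = 1)) (by simp [hk]),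
            List.filter_cons_of_neg (p := fun y => decide (pvKeyLen y = 2)) (by simp [hk]),
            List.filter_cons_of_neg (p := fun y => decide (pvKeyLen y = 3)) (by simp [hk]),
            List.filter_cons_of_neg (p := fun y => decide (pvKeyLen y = 4)) (by simp [hk])]
        have hstep : PySem.List.insertBy (fun a b => decide (pvKeyLen a < pvKeyLen b)) x
            (b1 ++ b2 ++ b3 ++ b4) = b1 ++ [x] ++ b2 ++ b3 ++ b4 := by
          have h := insertBy_mid (fun a b => decide (pvKeyLen a < pvKeyLen b)) x
            b1 (b2 ++ b3 ++ b4)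
            (fun y hy => by simp [h1 y hy, hk])
            (fun y hy => by
              simp only [List.mem_append] at hy
              rcases hy with (hy | hy) | hy
              · simp [h2 y hy, hk]
              · simp [h3 y hy, hk]
              · simp [h4 y hy, hk])
          simpa [List.append_assoc] using h
        rw [hstep, ih (b1 ++ [x]) b2 b3 b4
            (fun y hy => by rcases List.mem_append.1 hy with hy | hy
                            · exact h1 y hy
                            · simp at hy; subst hy; exact hk) h2 h3 h4]
        simp
      · -- key 2
        rw [List.filter_cons_of_pos (p := fun x => decide (pvKeyLen x ≤ 4)) (by simp [hx]),
            List.foldl_cons,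
            List.filter_cons_of_neg (p := fun y => decide (pvKeyLen y = 1)) (by simp [hk]),
            List.filter_cons_of_pos (p := fun y => decide (pvKeyLen y = 2)) (by simp [hk]),
            List.filter_cons_of_neg (p := fun y => decide (pvKeyLen y = 3)) (by simp [hk]),
            List.filter_cons_of_neg (p := fun y => decide (pvKeyLen y = 4)) (by simp [hk])]
        have hstep : PySem.List.insertBy (fun a b => decide (pvKeyLen a < pvKeyLen b)) x
            (b1 ++ b2 ++ b3 ++ b4) = b1 ++ (b2 ++ [x]) ++ b3 ++ b4 := by
          have h := insertBy_mid (fun a b => decide (pvKeyLen a < pvKeyLen b)) x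
            (b1 ++ b2) (b3 ++ b4)
            (fun y hy => by
              rcases List.mem_append.1 hy with hy | hy
              · simp [h1 y hy, hk]
              · simp [h2 y hy, hk])
            (fun y hy => by
              rcases List.mem_append.1 hy with hy | hy
              · simp [h3 y hy, hk]
              · simp [h4 y hy, hk])
          simpa [List.append_assoc] using h
        rw [hstep, ih b1 (b2 ++ [x]) b3 b4 h1
            (fun y hy => by rcases List.mem_append.1 hy with hy | hy
                            · exact h2 y hy
                            · simp at hy; subst hy; exact hk) h3 h4]
        simp
      · -- key 3
        rw [List.filter_cons_of_pos (p := fun x => decide (pvKeyLen x ≤ 4)) (by simp [hx]),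
            List.foldl_cons,
            List.filter_cons_of_neg (p := fun y => decide (pvKeyLen y = 1)) (by simp [hk]),
            List.filter_cons_of_neg (p := fun y => decide (pvKeyLen y = 2)) (by simp [hk]),
            List.filter_cons_of_pos (p := fun y => decide (pvKeyLen y = 3)) (by simp [hk]),
            List.filter_cons_of_neg (p := fun y => decide (pvKeyLen y = 4)) (by simp [hk])]
        have hstep : PySem.List.insertBy (fun a b => decide (pvKeyLen a < pvKeyLen b)) x
            (b1 ++ b2 ++ b3 ++ b4) = b1 ++ b2 ++ (b3 ++ [x]) ++ b4 := by
          have h := insertBy_mid (fun a b => decide (pvKeyLen a < pvKeyLen b)) x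
            (b1 ++ b2 ++ b3) b4
            (fun y hy => by
              simp only [List.mem_append] at hy
              rcases hy with (hy | hy) | hy
              · simp [h1 y hy, hk]
              · simp [h2 y hy, hk]
              · simp [h3 y hy, hk])
            (fun y hy => by simp [h4 y hy, hk])
          simpa [List.append_assoc] using h
        rw [hstep, ih b1 b2 (b3 ++ [x]) b4 h1 h2
            (fun y hy => by rcases List.mem_append.1 hy with hy | hy
                            · exact h3 y hy
                            · simp at hy; subst hy; exact hk) h4]
        simp
      · -- key 4
        rw [List.filter_cons_of_pos (p := fun x => decide (pvKeyLen x ≤ 4)) (by simp [hx]),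
            List.foldl_cons,
            List.filter_cons_of_neg (p := fun y => decide (pvKeyLen y = 1)) (by simp [hk]),
            List.filter_cons_of_neg (p := fun y => decide (pvKeyLen y = 2)) (by simp [hk]),
            List.filter_cons_of_neg (p := fun y => decide (pvKeyLen y = 3)) (by simp [hk]),
            List.filter_cons_of_pos (p := fun y => decide (pvKeyLen y = 4)) (by simp [hk])]
        have hstep : PySem.List.insertBy (fun a b => decide (pvKeyLen a < pvKeyLen b)) x
            (b1 ++ b2 ++ b3 ++ b4) = b1 ++ b2 ++ b3 ++ (b4 ++ [x]) := by
          have h := insertBy_mid (fun a b => decide (pvKeyLen a < pvKeyLen b)) x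
            (b1 ++ b2 ++ b3 ++ b4) ([] : List Int)
            (fun y hy => by
              simp only [List.mem_append] at hy
              rcases hy with ((hy | hy) | hy) | hy
              · simp [h1 y hy, hk]
              · simp [h2 y hy, hk]
              · simp [h3 y hy, hk]
              · simp [h4 y hy, hk])
            (fun y hy => by simp at hy)
          simpa [List.append_assoc] using h
        rw [hstep, ih b1 b2 b3 (b4 ++ [x]) h1 h2 h3
            (fun y hy => by rcases List.mem_append.1 hy with hy | hy
                            · exact h4 y hy
                            · simp at hy; subst hy; exact hk)]
        simp
    · have hx1 := one_le_pvKeyLen x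
      rw [List.filter_cons_of_neg (p := fun x => decide (pvKeyLen x ≤ 4)) (by simp [hx]),
          List.filter_cons_of_neg (p := fun y => decide (pvKeyLen y = 1)) (by simp; omega),
          List.filter_cons_of_neg (p := fun y => decide (pvKeyLen y = 2)) (by simp; omega),
          List.filter_cons_of_neg (p := fun y => decide (pvKeyLen y = 3)) (by simp; omega),
          List.filter_cons_of_neg (p := fun y => decide (pvKeyLen y = 4)) (by simp; omega)]
      exact ih b1 b2 b3 b4 h1 h2 h3 h4

-- ===== VERDICT (by name: the statement is the Claim_ definition above) =====
theorem number_len_sort_spec : Claim_equal_number_len_sort := by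
  intro lst _
  unfold Spec_number_len_sort number_len_sort number_len_sort_alt
  rw [PySem.List.sorted_eq_foldl_insertBy]
  have hb := buckets lst [] [] [] [] (by simp) (by simp) (by simp) (by simp)
  simp only [List.nil_append] at hb
  rw [hb]
  simp only [PySem.List.foldl_append_ite_eq_filter]
  simp [pvKeyLen]
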